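-- pv_equiv track=rewrite | github.com/RohanPatil01/python-mini-projects | Flames.py | calculate_flames
-- ===== SOURCE A (Python) =====
-- def calculate_flames(name1, name2):
--     name1 = name1.lower().replace(" ", "")
--     name2 = name2.lower().replace(" ", "")
--
--     for char in name1:
--         if char in name2:
--             name1 = name1.replace(char, "", 1)
--             name2 = name2.replace(char, "", 1)
--
--     combined_length = len(name1) + len(name2)
--     flames_order = ['Friends', 'Lovers', 'Affectionate', 'Marriage', 'Enemies', 'Siblings']
--
--     while len(flames_order) > 1:
--         index = (combined_length % len(flames_order)) - 1
--
--         if index >= 0: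
--             right = flames_order[index + 1:]
--             left = flames_order[:index]
--             flames_order = right + left
--         else:
--             flames_order = flames_order[:-1]
--
--     return flames_order[0]
-- ===== SOURCE B (Python) =====
-- def calculate_flames(name1, name2):
--     n1 = name1.lower().replace(" ", "")
--     n2 = name2.lower().replace(" ", "")
--
--     # count common letters by consuming them from a copy of n2 only
--     rest2 = n2
--     k = 0
--     for ch in n1:
--         if ch in rest2:
--             rest2 = rest2.replace(ch, "", 1)
--             k += 1
--
--     total = len(n1) + len(n2) - 2 * k
--
--     # Josephus survivor recurrence instead of simulating the eliminations
--     idx = 0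
--     for i in range(2, 7):
--         idx = (idx + total) % i
--
--     return ['Friends', 'Lovers', 'Affectionate', 'Marriage', 'Enemies', 'Siblings'][idx]
-- ===== Notes on version B (the rewrite author's own statement) =====
-- stated objective: simpler
-- what changed: B counts common letters with a counter while consuming only a copy of name2 (instead of A's rewriting of both strings), and replaces A's while-loop that simulates each FLAMES elimination by slicing/rotating the list with the Josephus survivor recurrence idx=(idx+total)%i for i=2..6, indexing the fixed list once.
import Mathlib
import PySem

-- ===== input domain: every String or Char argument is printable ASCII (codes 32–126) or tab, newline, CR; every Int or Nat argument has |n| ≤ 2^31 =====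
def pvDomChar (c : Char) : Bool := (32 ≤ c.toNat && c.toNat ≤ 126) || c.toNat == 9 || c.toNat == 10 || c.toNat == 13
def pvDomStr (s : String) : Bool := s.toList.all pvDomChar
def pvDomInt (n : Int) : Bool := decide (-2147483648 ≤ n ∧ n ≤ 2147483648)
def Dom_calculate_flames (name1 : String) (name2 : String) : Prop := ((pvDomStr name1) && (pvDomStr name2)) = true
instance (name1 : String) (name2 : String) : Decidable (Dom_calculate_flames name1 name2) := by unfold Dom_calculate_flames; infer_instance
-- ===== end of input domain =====

-- B replaces A's elimination simulation by the Josephus survivor recurrence and counts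
-- common letters consuming only a copy of name2 (objective: simpler).

-- ===== PORT A =====

-- shared literal constant (the same list literal appears in both Pythons)
def pvFlames : List String := ["Friends", "Lovers", "Affectionate", "Marriage", "Enemies", "Siblings"]

-- name.lower().replace(" ", ""), on the code-point list
def pvNorm (s : String) : List Char :=
  PySem.Chars.replace (PySem.Chars.lower s.toList) [' '] []

-- loop body: `if char in name2: name1 = name1.replace(char, "", 1); name2 = name2.replace(char, "", 1)`
-- s.replace(c, "", 1) for a single char c removes the first occurrence of c (if any): List.erase is exact
def pvStepA (st : List Char × List Char) (c : Char) : List Char × List Char :=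
  if c ∈ st.2 then (st.1.erase c, st.2.erase c) else st

-- the while-loop; fuel 6 (the list starts at length 6 and shrinks by one each iteration, so ≤ 5 iterations run;
-- the Python guard len(flames_order) > 1 is kept)
def pvLoopA (n : Int) : Nat → List String → List String
  | 0, fl => fl
  | fuel + 1, fl =>
    if 1 < fl.length then
      let index := PySem.Int.mod n (PySem.List.len fl) - 1
      if 0 ≤ index then
        pvLoopA n fuel (PySem.List.slice fl (some (index + 1)) none ++ PySem.List.slice fl none (some index))
      else
        pvLoopA n fuel (PySem.List.slice fl none (some (-1)))
    else fl

def calculate_flames (name1 : String) (name2 : String) : String :=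
  let n1 := pvNorm name1
  let n2 := pvNorm name2
  -- `for char in name1:` iterates the ORIGINAL string while name1/name2 are rebound
  let st := n1.foldl pvStepA (n1, n2)
  let combined : Int := PySem.List.len st.1 + PySem.List.len st.2
  -- flames_order[0]; the loop provably never empties the list, so the IndexError default is unreachable
  (PySem.List.pyGet? (pvLoopA combined 6 pvFlames) 0).getD ""

-- ===== PORT B =====

-- loop body: `if ch in rest2: rest2 = rest2.replace(ch, "", 1); k += 1`
def pvStepB (st : List Char × Int) (c : Char) : List Char × Int :=
  if c ∈ st.1 then (st.1.erase c, st.2 + 1) else st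

def calculate_flames_alt (name1 : String) (name2 : String) : String :=
  let n1 := pvNorm name1
  let n2 := pvNorm name2
  let st := n1.foldl pvStepB (n2, 0)
  let total : Int := PySem.List.len n1 + PySem.List.len n2 - 2 * st.2
  -- Josephus survivor recurrence: for i in range(2, 7): idx = (idx + total) % i
  let idx := (PySem.List.pyRange 2 7 1).foldl (fun idx i => PySem.Int.mod (idx + total) i) 0
  -- [...][idx]; idx is provably in 0..5, so the IndexError default is unreachable
  (PySem.List.pyGet? pvFlames idx).getD ""

-- ===== PRECONDITION & SPEC =====
def Spec_calculate_flames (name1 : String) (name2 : String) (out : String) : Prop := out = calculate_flames_alt name1 name2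
instance (name1 : String) (name2 : String) (out : String) : Decidable (Spec_calculate_flames name1 name2 out) := by unfold Spec_calculate_flames; infer_instance

-- ===== CLAIM (what is proved, stated in full; the proofs are below) =====
def Claim_equal_calculate_flames : Prop := ∀ (name1 : String) (name2 : String), Dom_calculate_flames name1 name2 → Spec_calculate_flames name1 name2 (calculate_flames name1 name2)

-- ===== LEMMAS AND PROOFS =====

-- Phase 1: A's double-removal fold and B's count fold agree:
-- A's final name2 equals B's final rest2, and the lengths are governed by B's counter.
lemma pvPhase1 (l : List Char) : ∀ (s1 s2 : List Char) (k : Int),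
    (∀ c, l.count c ≤ s1.count c) →
    (l.foldl pvStepA (s1, s2)).2 = (l.foldl pvStepB (s2, k)).1
    ∧ ((l.foldl pvStepA (s1, s2)).1.length : Int) = (s1.length : Int) + k - (l.foldl pvStepB (s2, k)).2
    ∧ ((l.foldl pvStepB (s2, k)).1.length : Int) = (s2.length : Int) + k - (l.foldl pvStepB (s2, k)).2 := by
  induction l with
  | nil => intro s1 s2 k _; refine ⟨rfl, by simp, by simp⟩
  | cons c t ih =>
    intro s1 s2 k h
    have hc1 : c ∈ s1 := by
      have := h c
      simp [List.count_cons_self] at this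
      exact List.count_pos_iff.mp (by omega)
    by_cases hc : c ∈ s2
    · have eA : (c :: t).foldl pvStepA (s1, s2) = t.foldl pvStepA (s1.erase c, s2.erase c) := by
        simp [pvStepA, hc]
      have eB : (c :: t).foldl pvStepB (s2, k) = t.foldl pvStepB (s2.erase c, k + 1) := by
        simp [pvStepB, hc]
      have hinv : ∀ d, t.count d ≤ (s1.erase c).count d := by
        intro d
        by_cases hdc : d = c
        · subst hdc
          have := h d
          rw [List.count_erase_self]
          simp [List.count_cons_self] at this
          omega
        · rw [List.count_erase_of_ne hdc]
          have h1 := h d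
          have h2 : t.count d ≤ (c :: t).count d := by simp [List.count_cons]
          omega
      obtain ⟨ih1, ih2, ih3⟩ := ih (s1.erase c) (s2.erase c) (k + 1) hinv
      rw [eA, eB]
      have hl1 := List.length_erase_of_mem hc1
      have hl2 := List.length_erase_of_mem hc
      have hp1 : 0 < s1.length := List.length_pos_of_mem hc1
      have hp2 : 0 < s2.length := List.length_pos_of_mem hc
      refine ⟨ih1, ?_, ?_⟩
      · rw [ih2, hl1]; omega
      · rw [ih3, hl2]; omega
    · have eA : (c :: t).foldl pvStepA (s1, s2) = t.foldl pvStepA (s1, s2) := by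
        simp [pvStepA, hc]
      have eB : (c :: t).foldl pvStepB (s2, k) = t.foldl pvStepB (s2, k) := by
        simp [pvStepB, hc]
      have hinv : ∀ d, t.count d ≤ s1.count d := by
        intro d
        have h1 := h d
        have h2 : t.count d ≤ (c :: t).count d := by simp [List.count_cons]
        omega
      rw [eA, eB]
      exact ih s1 s2 k hinv

-- Phase 2 congruence: the elimination loop only reads n modulo the current length (2..6)
lemma pvLoopA_congr (a b : Int)
    (h : ∀ k : Int, 2 ≤ k → k ≤ 6 → PySem.Int.mod a k = PySem.Int.mod b k) :
    ∀ (fuel : Nat) (fl : List String), fl.length ≤ 6 → pvLoopA a fuel fl = pvLoopA b fuel fl := by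
  intro fuel
  induction fuel with
  | zero => intro fl _; rfl
  | succ f ih =>
    intro fl hlen
    by_cases hl : 1 < fl.length
    · have hm : PySem.Int.mod a (PySem.List.len fl) = PySem.Int.mod b (PySem.List.len fl) := by
        apply h <;> simp [PySem.List.len_eq] <;> omega
      rw [pvLoopA, pvLoopA, if_pos hl, if_pos hl, hm]
      set index := PySem.Int.mod b (PySem.List.len fl) - 1 with hidx
      have hlt : PySem.Int.mod b (PySem.List.len fl) < fl.length := by
        have := PySem.Int.mod_lt b (b := (PySem.List.len fl)) (by simp [PySem.List.len_eq]; omega)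
        simpa [PySem.List.len_eq] using this
      by_cases hge : 0 ≤ index
      · rw [if_pos hge, if_pos hge]
        apply ih
        have h1 : PySem.List.slice fl (some (index + 1)) none = fl.drop (index + 1).toNat :=
          PySem.List.slice_from _ (by omega)
        have h2 : PySem.List.slice fl none (some index) = fl.take index.toNat :=
          PySem.List.slice_to _ hge
        rw [h1, h2]
        simp only [List.length_append, List.length_drop, List.length_take]
        omega
      · rw [if_neg hge, if_neg hge]
        apply ih
        rw [PySem.List.slice_to_neg_one]
        simp [List.length_dropLast]
        omega
    · rw [pvLoopA, pvLoopA, if_neg hl, if_neg hl]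

lemma pvModTwo (a : Int) : PySem.Int.mod a 2 = a % 2 := PySem.Int.mod_eq_emod_of_pos (by norm_num)
lemma pvModThree (a : Int) : PySem.Int.mod a 3 = a % 3 := PySem.Int.mod_eq_emod_of_pos (by norm_num)
lemma pvModFour (a : Int) : PySem.Int.mod a 4 = a % 4 := PySem.Int.mod_eq_emod_of_pos (by norm_num)
lemma pvModFive (a : Int) : PySem.Int.mod a 5 = a % 5 := PySem.Int.mod_eq_emod_of_pos (by norm_num)
lemma pvModSix (a : Int) : PySem.Int.mod a 6 = a % 6 := PySem.Int.mod_eq_emod_of_pos (by norm_num)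

-- Phase 2: A's elimination loop picks exactly the Josephus survivor
lemma pvPhase2 (n : Int) :
    (PySem.List.pyGet? (pvLoopA n 6 pvFlames) 0).getD "" =
    (PySem.List.pyGet? pvFlames
      ((PySem.List.pyRange 2 7 1).foldl (fun idx i => PySem.Int.mod (idx + n) i) 0)).getD "" := by
  have hr0 : 0 ≤ n % 60 := by omega
  have hr : n % 60 < 60 := by omega
  have hA : pvLoopA n 6 pvFlames = pvLoopA (n % 60) 6 pvFlames := by
    apply pvLoopA_congr
    · intro k h2 h6
      rw [PySem.Int.mod_eq_emod_of_pos (by omega), PySem.Int.mod_eq_emod_of_pos (by omega)]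
      interval_cases k <;> omega
    · decide
  have hrange : PySem.List.pyRange 2 7 1 = [2, 3, 4, 5, 6] := by decide
  have hB : (PySem.List.pyRange 2 7 1).foldl (fun idx i => PySem.Int.mod (idx + n) i) 0
      = (PySem.List.pyRange 2 7 1).foldl (fun idx i => PySem.Int.mod (idx + n % 60) i) 0 := by
    rw [hrange]
    simp only [List.foldl_cons, List.foldl_nil, pvModTwo, pvModThree, pvModFour, pvModFive, pvModSix]
    have h2 : (0 + n) % 2 = (0 + n % 60) % 2 := by omega
    have h3 : ∀ x : Int, (x + n) % 3 = (x + n % 60) % 3 := fun x => by omega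
    have h4 : ∀ x : Int, (x + n) % 4 = (x + n % 60) % 4 := fun x => by omega
    have h5 : ∀ x : Int, (x + n) % 5 = (x + n % 60) % 5 := fun x => by omega
    have h6 : ∀ x : Int, (x + n) % 6 = (x + n % 60) % 6 := fun x => by omega
    rw [h2, h3, h4, h5, h6]
  rw [hA, hB]
  have main : ∀ r : Int, 0 ≤ r → r < 60 →
      (PySem.List.pyGet? (pvLoopA r 6 pvFlames) 0).getD "" =
      (PySem.List.pyGet? pvFlames
        ((PySem.List.pyRange 2 7 1).foldl (fun idx i => PySem.Int.mod (idx + r) i) 0)).getD "" := by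
    intro r h1 h2
    interval_cases r <;> decide
  exact main _ hr0 hr

-- ===== VERDICT (by name: the statement is the Claim_ definition above) =====
theorem calculate_flames_spec : Claim_equal_calculate_flames := by
  intro name1 name2 _
  simp only [Spec_calculate_flames, calculate_flames, calculate_flames_alt]
  obtain ⟨h1, h2, h3⟩ := pvPhase1 (pvNorm name1) (pvNorm name1) (pvNorm name2) 0 (fun c => le_rfl)
  have h1l := congrArg List.length h1
  have hCT : PySem.List.len ((pvNorm name1).foldl pvStepA (pvNorm name1, pvNorm name2)).1
        + PySem.List.len ((pvNorm name1).foldl pvStepA (pvNorm name1, pvNorm name2)).2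
      = PySem.List.len (pvNorm name1) + PySem.List.len (pvNorm name2)
        - 2 * ((pvNorm name1).foldl pvStepB (pvNorm name2, 0)).2 := by
    simp only [PySem.List.len_eq]
    omega
  rw [hCT]
  exact pvPhase2 _
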